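-- pv_equiv track=rewrite | github.com/joshuaSmith2021/CODEWARS2019 | prob27.py | numfind
-- ===== SOURCE A (Python) =====
-- def numfind(x):
--     dic = {"a" : 0, "b" : 0}
--     counter = 0
--     for each in x:
--         each = each.replace('?', '')
--         each = each.replace('!', '')
--         each = each.replace('th', '')
--         each = each.replace('rd', '')
--         each = each.replace('nd', '')
--         each = each.replace('st', '')
--         if counter == 0:
--             if each.isdecimal():
--                 dic["a"] = int(each)
--                 counter += 1
--                 continue
--         if counter == 1:
--             if each.isdecimal():
--                 dic["b"] = int(each)
--     return(dic)
-- ===== SOURCE B (Python) =====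
-- def numfind(x):
--     nums = []
--     for each in x:
--         for junk in ('?', '!', 'th', 'rd', 'nd', 'st'):
--             each = each.replace(junk, '')
--         if each.isdecimal():
--             nums.append(int(each))
--     return {"a": nums[0] if nums else 0,
--             "b": nums[-1] if len(nums) >= 2 else 0}
-- ===== Notes on version B (the rewrite author's own statement) =====
-- stated objective: simpler
-- what changed: Replaces the counter/flag state machine with fall-through branches by collecting all cleaned decimal values into one list and building the result dict by position (first element, and last element when there are at least two).
import Mathlib
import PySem

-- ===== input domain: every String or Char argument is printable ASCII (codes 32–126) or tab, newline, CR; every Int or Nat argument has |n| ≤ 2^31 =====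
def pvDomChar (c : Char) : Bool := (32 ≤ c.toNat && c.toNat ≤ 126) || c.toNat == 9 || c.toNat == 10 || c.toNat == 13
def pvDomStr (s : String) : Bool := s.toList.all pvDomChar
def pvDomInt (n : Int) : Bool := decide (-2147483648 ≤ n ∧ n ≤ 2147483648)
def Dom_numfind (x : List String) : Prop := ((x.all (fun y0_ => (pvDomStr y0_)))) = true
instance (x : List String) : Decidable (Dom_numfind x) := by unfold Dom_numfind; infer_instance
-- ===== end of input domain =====

-- B replaces A's counter/flag state machine by collecting all cleaned decimal values and indexing by position; same cost, simpler.
-- .isdecimal() is ported as PySem.Str.strIsdigit — identical on the printable-ASCII domain Dom_numfind.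

-- ===== PORT A =====
-- the six chained .replace calls (shared by both Pythons, in this order)
def pvClean (s : String) : String :=
  PySem.Str.replace (PySem.Str.replace (PySem.Str.replace (PySem.Str.replace
    (PySem.Str.replace (PySem.Str.replace s "?" "") "!" "") "th" "") "rd" "") "nd" "") "st" ""

-- one iteration of A's loop; state = (dic, counter); int(each) is ofStr?, total via getD 0 (guarded by isdecimal)
def numfindStep (st : PySem.Dict String Int × Int) (each0 : String) : PySem.Dict String Int × Int :=
  let each := pvClean each0
  let dic := st.1
  let counter := st.2
  if counter == 0 && PySem.Str.strIsdigit each then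
    (dic.insert "a" ((PySem.Int.ofStr? each).getD 0), counter + 1)  -- continue: skip the second check
  else if counter == 1 && PySem.Str.strIsdigit each then
    (dic.insert "b" ((PySem.Int.ofStr? each).getD 0), counter)
  else
    (dic, counter)

def numfind (x : List String) : List (String × Int) :=
  (x.foldl numfindStep (PySem.Dict.ofList [("a", 0), ("b", 0)], 0)).1.items

-- ===== PORT B =====
def numfind_alt (x : List String) : List (String × Int) :=
  let nums := ((x.map pvClean).filter (fun s => PySem.Str.strIsdigit s)).map
                (fun s => (PySem.Int.ofStr? s).getD 0)
  [("a", nums.headD 0), ("b", if 2 ≤ nums.length then nums.getLastD 0 else 0)]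

-- ===== PRECONDITION & SPEC =====
def Spec_numfind (x : List String) (out : List (String × Int)) : Prop := out = numfind_alt x
instance (x : List String) (out : List (String × Int)) : Decidable (Spec_numfind x out) := by unfold Spec_numfind; infer_instance

-- ===== CLAIM (what is proved, stated in full; the proofs are below) =====
def Claim_equal_numfind : Prop := ∀ (x : List String), Dom_numfind x → Spec_numfind x (numfind x)

-- ===== LEMMAS AND PROOFS =====

-- the list of cleaned decimal values of x (B's nums)
def pvNums (x : List String) : List Int :=
  ((x.map pvClean).filter (fun s => PySem.Str.strIsdigit s)).map
    (fun s => (PySem.Int.ofStr? s).getD 0)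

theorem pvNums_cons (e : String) (x : List String) :
    pvNums (e :: x) =
      if PySem.Chars.strIsdigit (pvClean e).toList
      then ((PySem.Int.ofStr? (pvClean e)).getD 0) :: pvNums x
      else pvNums x := by
  simp only [pvNums, List.map_cons, List.filter_cons, PySem.Str.strIsdigit_eq]
  split_ifs <;> simp_all

-- once counter = 1, the loop just overwrites "b" with each decimal value
theorem phase1 (x : List String) (d : PySem.Dict String Int) :
    x.foldl numfindStep (d, 1) =
      ((pvNums x).foldl (fun d n => d.insert "b" n) d, 1) := by
  induction x generalizing d with
  | nil => simp [pvNums]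
  | cons e x ih =>
    rw [List.foldl_cons, pvNums_cons]
    by_cases h : PySem.Chars.strIsdigit (pvClean e).toList <;>
      simp [numfindStep, h, ih]

-- folding "b"-overwrites over a two-key literal dict keeps "a" and sets "b" to the last value
theorem foldB (l : List Int) (a b : Int) :
    l.foldl (fun d n => d.insert "b" n) (PySem.Dict.mk [("a", a), ("b", b)]) =
      PySem.Dict.mk [("a", a), ("b", l.getLastD b)] := by
  induction l generalizing b with
  | nil => rfl
  | cons n l ih =>
    rw [List.foldl_cons, List.getLastD_cons]
    have hins : (PySem.Dict.mk [("a", a), ("b", b)]).insert "b" n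
        = PySem.Dict.mk [("a", a), ("b", n)] := rfl
    rw [hins, ih]

-- phase 0: the whole loop, characterised by pvNums
theorem phase0 (x : List String) :
    x.foldl numfindStep (PySem.Dict.mk [("a", 0), ("b", 0)], 0) =
      match pvNums x with
      | [] => (PySem.Dict.mk [("a", 0), ("b", 0)], 0)
      | n :: rest => (PySem.Dict.mk [("a", n), ("b", rest.getLastD 0)], 1) := by
  induction x with
  | nil => simp [pvNums]
  | cons e x ih =>
    rw [List.foldl_cons, pvNums_cons]
    by_cases h : PySem.Chars.strIsdigit (pvClean e).toList
    · have hstep : numfindStep (PySem.Dict.mk [("a", 0), ("b", 0)], 0) e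
          = (PySem.Dict.mk [("a", (PySem.Int.ofStr? (pvClean e)).getD 0), ("b", 0)], 1) := by
        simp only [numfindStep]
        have hins : (PySem.Dict.mk [("a", (0:Int)), ("b", 0)]).insert "a"
            ((PySem.Int.ofStr? (pvClean e)).getD 0)
            = PySem.Dict.mk [("a", (PySem.Int.ofStr? (pvClean e)).getD 0), ("b", 0)] := rfl
        simp [h, hins]
      rw [hstep, phase1, foldB, if_pos h]
    · have hstep : numfindStep (PySem.Dict.mk [("a", 0), ("b", 0)], 0) e
          = (PySem.Dict.mk [("a", 0), ("b", 0)], 0) := by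
        simp [numfindStep, h]
      rw [hstep, ih, if_neg h]

-- ===== VERDICT (by name: the statement is the Claim_ definition above) =====
theorem numfind_spec : Claim_equal_numfind := by
  intro x _
  show numfind x = numfind_alt x
  have hof : PySem.Dict.ofList [("a", (0:Int)), ("b", 0)] = PySem.Dict.mk [("a", 0), ("b", 0)] := rfl
  unfold numfind numfind_alt
  rw [hof, phase0]
  show _ = [("a", (pvNums x).headD 0), ("b", if 2 ≤ (pvNums x).length then (pvNums x).getLastD 0 else 0)]
  cases hN : pvNums x with
  | nil => rfl
  | cons n rest =>
    cases rest with
    | nil => rfl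
    | cons m rest' => simp
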